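-- pv_equiv track=rewrite | github.com/labuwx/progpuzzles | rosalind/nwck/newick.py | from_newick
-- ===== SOURCE A (Python) =====
-- def nw_tokenize(nws):
--     tokens, s = [], ''
--     for c in nws:
--         if c in '():,;':
--             if s:
--                 tokens.append(s)
--                 s = ''
--             tokens.append(c)
--         else:
--             s += c
--     if s: tokens.append(s)
--     return tokens
--
-- def from_newick(nws):
--     tokens = nw_tokenize(nws)
--     nodes = {}
--     prefix, label, w = [], '', None
--     for t in tokens:
--         if t == '(':
--             prefix.append(0)
--         elif t in '),;':
--             nodes[tuple(prefix)] = (w if w != None else 1, label)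
--             label = ''
--             w = None
--             if t == ')':
--                 prefix.pop()
--             elif t == ',':
--                 prefix[-1] += 1
--         elif t == ':':
--             w = 0
--         elif w != None:
--             w = int(t)
--         else:
--             label = t
--
--     return nodes
-- ===== SOURCE B (Python) =====
-- def from_newick(nws):
--     # One-pass char-level parser: fuses the tokenizer into the parse loop
--     # (no intermediate token list); same dict, keys, defaults and exceptions.
--     nodes = {}
--     prefix, label, w, buf = [], '', None, []
--
--     def flush():
--         nonlocal label, w
--         if buf:
--             t = ''.join(buf)
--             if w is not None:
--                 w = int(t)
--             else:
--                 label = t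
--             buf.clear()
--
--     for c in nws:
--         if c == '(':
--             flush()
--             prefix.append(0)
--         elif c in '),;':
--             flush()
--             nodes[tuple(prefix)] = (w if w is not None else 1, label)
--             label, w = '', None
--             if c == ')':
--                 prefix.pop()
--             elif c == ',':
--                 prefix[-1] += 1
--         elif c == ':':
--             flush()
--             w = 0
--         else:
--             buf.append(c)
--     flush()
--     return nodes
-- ===== Notes on version B (the rewrite author's own statement) =====
-- stated objective: alternative
-- what changed: B fuses A's two passes (tokenizer building a token list, then a token loop) into a single character-level pass that maintains the pending buffer inline and flushes it into weight/label at each special character, so no intermediate token list is built.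
import Mathlib
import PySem

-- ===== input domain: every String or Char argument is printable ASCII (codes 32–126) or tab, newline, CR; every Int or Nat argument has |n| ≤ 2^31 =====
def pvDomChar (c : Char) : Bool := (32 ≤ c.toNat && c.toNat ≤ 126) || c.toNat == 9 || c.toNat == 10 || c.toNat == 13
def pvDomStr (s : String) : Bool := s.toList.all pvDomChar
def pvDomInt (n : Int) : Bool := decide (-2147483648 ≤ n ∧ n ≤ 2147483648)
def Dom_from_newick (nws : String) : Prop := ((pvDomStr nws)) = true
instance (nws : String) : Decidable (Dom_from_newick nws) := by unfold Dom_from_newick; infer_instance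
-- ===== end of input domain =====

-- B fuses A's tokenizer and token loop into a single character pass with an inline
-- buffer flush (no intermediate token list); same dict, keys and defaults (objective: alternative).

-- ===== PORT A =====
-- the special characters '():,;' in source order
def pvSpecials : List Char := ['(', ')', ':', ',', ';']

-- state of the parse loop: (nodes, prefix, label, w)  (tokens/labels carried as List Char)
abbrev NwSt := PySem.Dict (List Int) (Int × String) × List Int × String × Option Int

-- one step of the tokenizer loop of nw_tokenize (state = (tokens, s))
def nwTokStep (acc : List (List Char) × List Char) (c : Char) : List (List Char) × List Char :=
  if pvSpecials.contains c then
    (if acc.2 ≠ [] then acc.1 ++ [acc.2, [c]] else acc.1 ++ [[c]], [])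
  else (acc.1, acc.2 ++ [c])

def nw_tokenize (nws : String) : List (List Char) :=
  let r := nws.toList.foldl nwTokStep ([], [])
  if r.2 ≠ [] then r.1 ++ [r.2] else r.1

-- one step of A's token loop; Pre_ excludes the inputs where Python raises,
-- so the defensive defaults (dropLast / getLast?.getD / (ofChars? _).getD) are never reached inside Pre_
def nwStep (st : NwSt) (t : List Char) : NwSt :=
  let (nodes, pfx, label, w) := st
  if t = ['('] then (nodes, pfx ++ [0], label, w)
  else if t = [')'] ∨ t = [','] ∨ t = [';'] then
    let nodes' := nodes.insert pfx ((match w with | some v => v | none => 1), label)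
    let pfx' := if t = [')'] then pfx.dropLast
      else if t = [','] then pfx.dropLast ++ [pfx.getLast?.getD 0 + 1]
      else pfx
    (nodes', pfx', "", none)
  else if t = [':'] then (nodes, pfx, label, some 0)
  else match w with
    | some _ => (nodes, pfx, label, some ((PySem.Int.ofChars? t).getD 0))
    | none => (nodes, pfx, String.ofList t, w)

def from_newick (nws : String) : List (List Int × Int × String) :=
  ((nw_tokenize nws).foldl nwStep (PySem.Dict.empty, [], "", none)).1.items

-- ===== PORT B =====
-- B's flush(): consume the pending buffer s into w (via int) or label
def altFlush (st : NwSt) (s : List Char) : NwSt :=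
  if s ≠ [] then
    let (nodes, pfx, label, w) := st
    match w with
    | some _ => (nodes, pfx, label, some ((PySem.Int.ofChars? s).getD 0))
    | none => (nodes, pfx, String.ofList s, w)
  else st

-- one step of B's single character loop (state = (parser state, buffer))
def altStep (acc : NwSt × List Char) (c : Char) : NwSt × List Char :=
  let (st, s) := acc
  if c = '(' then
    let (nodes, pfx, label, w) := altFlush st s
    ((nodes, pfx ++ [0], label, w), [])
  else if c = ')' ∨ c = ',' ∨ c = ';' then
    let (nodes, pfx, label, w) := altFlush st s
    let nodes' := nodes.insert pfx ((match w with | some v => v | none => 1), label)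
    let pfx' := if c = ')' then pfx.dropLast
      else if c = ',' then pfx.dropLast ++ [pfx.getLast?.getD 0 + 1]
      else pfx
    ((nodes', pfx', "", none), [])
  else if c = ':' then
    let st' := altFlush st s
    ((st'.1, st'.2.1, st'.2.2.1, some 0), [])
  else (st, s ++ [c])

def from_newick_alt (nws : String) : List (List Int × Int × String) :=
  let r := nws.toList.foldl altStep ((PySem.Dict.empty, [], "", none), [])
  (altFlush r.1 r.2).1.items

-- ===== PRECONDITION & SPEC =====
-- Pre_ excludes exactly the inputs where Python A raises (B raises there too):
-- a ')' or ',' token reached with an empty prefix stack (IndexError), or a non-special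
-- token int()-ed because the last separator-like token before it is ':' but it is not a
-- valid int literal (ValueError).
def Pre_from_newick (nws : String) : Prop :=
  (∀ i, i < (nw_tokenize nws).length →
      ((nw_tokenize nws)[i]! = [')'] ∨ (nw_tokenize nws)[i]! = [',']) →
      ((nw_tokenize nws).take i).count [')'] < ((nw_tokenize nws).take i).count ['(']) ∧
  (∀ i, i < (nw_tokenize nws).length →
      (nw_tokenize nws)[i]! ∉ ([['('], [')'], [':'], [','], [';']] : List (List Char)) →
      ((nw_tokenize nws).take i).reverse.find?
          (fun t => ([[':'], [')'], [','], [';']] : List (List Char)).contains t) = some [':'] →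
      (PySem.Int.ofChars? (nw_tokenize nws)[i]!).isSome)
instance (nws : String) : Decidable (Pre_from_newick nws) := by unfold Pre_from_newick; infer_instance

def pvWitness_from_newick : String := "(a:2,b)c;"

def Spec_from_newick (nws : String) (out : List (List Int × Int × String)) : Prop := out = from_newick_alt nws
instance (nws : String) (out : List (List Int × Int × String)) : Decidable (Spec_from_newick nws out) := by unfold Spec_from_newick; infer_instance

-- ===== CLAIM (what is proved, stated in full; the proofs are below) =====
def Claim_equal_from_newick : Prop := ∀ (nws : String), Dom_from_newick nws → Pre_from_newick nws → Spec_from_newick nws (from_newick nws)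

-- ===== LEMMAS AND PROOFS =====

-- buffers contain no special characters
def pvNoSpec (s : List Char) : Prop := ∀ c ∈ s, c ∉ pvSpecials

-- the tokenizer fold is accumulator-independent in its token list
theorem nwTokStep_acc (cs : List Char) : ∀ (ts : List (List Char)) (s : List Char),
    List.foldl nwTokStep (ts, s) cs
      = (ts ++ (List.foldl nwTokStep ([], s) cs).1, (List.foldl nwTokStep ([], s) cs).2) := by
  induction cs with
  | nil => intro ts s; simp
  | cons c cs ih =>
    intro ts s
    simp only [List.foldl_cons, nwTokStep]
    by_cases hc : pvSpecials.contains c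
    · rw [if_pos hc, if_pos hc]
      by_cases hs : s = []
      · subst hs
        simp only [ne_eq, not_true_eq_false, if_false, List.nil_append]
        rw [ih (ts ++ [[c]]) [], ih [[c]] []]
        simp [List.append_assoc]
      · simp only [ne_eq, hs, not_false_eq_true, if_true, List.nil_append]
        rw [ih (ts ++ [s, [c]]) [], ih [s, [c]] []]
        simp [List.append_assoc]
    · rw [if_neg hc, if_neg hc]
      exact ih ts (s ++ [c])

-- on a nonempty buffer with no special chars, one A token step is B's flush
theorem nwStep_eq_altFlush (st : NwSt) (s : List Char) (hne : s ≠ []) (hns : pvNoSpec s) :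
    nwStep st s = altFlush st s := by
  obtain ⟨nodes, pfx, label, w⟩ := st
  have h1 : s ≠ ['('] := fun h => hns '(' (h ▸ List.mem_singleton.mpr rfl) (by decide)
  have h2 : s ≠ [')'] := fun h => hns ')' (h ▸ List.mem_singleton.mpr rfl) (by decide)
  have h3 : s ≠ [':'] := fun h => hns ':' (h ▸ List.mem_singleton.mpr rfl) (by decide)
  have h4 : s ≠ [','] := fun h => hns ',' (h ▸ List.mem_singleton.mpr rfl) (by decide)
  have h5 : s ≠ [';'] := fun h => hns ';' (h ▸ List.mem_singleton.mpr rfl) (by decide)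
  simp [nwStep, altFlush, h1, h2, h3, h4, h5, hne]

-- one B char step, described through A's token step
theorem altStep_eq (st : NwSt) (s : List Char) (c : Char) (hns : pvNoSpec s) :
    altStep (st, s) c
      = if pvSpecials.contains c then
          (List.foldl nwStep st (if s ≠ [] then [s, [c]] else [[c]]), [])
        else (st, s ++ [c]) := by
  by_cases hc : pvSpecials.contains c
  · rw [if_pos hc]
    have hflush : List.foldl nwStep st (if s ≠ [] then [s, [c]] else [[c]])
        = nwStep (altFlush st s) [c] := by
      by_cases hs : s = []
      · subst hs
        simp only [ne_eq, not_true_eq_false, if_false, List.foldl_cons, List.foldl_nil]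
        rw [show altFlush st [] = st from by simp [altFlush]]
      · simp only [ne_eq, hs, not_false_eq_true, if_true, List.foldl_cons, List.foldl_nil]
        rw [nwStep_eq_altFlush st s hs hns]
    rw [hflush]
    have hcm : c ∈ (['(', ')', ':', ',', ';'] : List Char) := by simpa [pvSpecials] using hc
    rcases haf : altFlush st s with ⟨nodes, pfx, label, w⟩
    fin_cases hcm <;> simp [altStep, nwStep, haf]
  · rw [if_neg hc]
    have h1 : c ≠ '(' := fun h => hc (by simp [h, pvSpecials])
    have h2 : c ≠ ')' := fun h => hc (by simp [h, pvSpecials])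
    have h3 : c ≠ ':' := fun h => hc (by simp [h, pvSpecials])
    have h4 : c ≠ ',' := fun h => hc (by simp [h, pvSpecials])
    have h5 : c ≠ ';' := fun h => hc (by simp [h, pvSpecials])
    simp [altStep, h1, h2, h3, h4, h5]

-- the finishing step of the tokenizer
def tokFin (p : List (List Char) × List Char) : List (List Char) :=
  if p.2 ≠ [] then p.1 ++ [p.2] else p.1

-- main invariant: B's char loop + final flush = A's token loop over the tokenizer output
theorem main_inv (cs : List Char) : ∀ (st : NwSt) (s : List Char), pvNoSpec s →
    altFlush (List.foldl altStep (st, s) cs).1 (List.foldl altStep (st, s) cs).2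
      = List.foldl nwStep st (tokFin (List.foldl nwTokStep ([], s) cs)) := by
  induction cs with
  | nil =>
    intro st s hns
    by_cases hs : s = []
    · simp [hs, tokFin, altFlush]
    · simp only [List.foldl_nil, tokFin, ne_eq, hs, not_false_eq_true, if_true, List.nil_append,
        List.foldl_cons]
      rw [nwStep_eq_altFlush st s hs hns]
  | cons c cs ih =>
    intro st s hns
    simp only [List.foldl_cons]
    rw [altStep_eq st s c hns]
    by_cases hc : pvSpecials.contains c
    · rw [if_pos hc]
      rw [ih _ [] (fun x hx => absurd hx (List.not_mem_nil))]
      have htok : nwTokStep ([], s) c = ((if s ≠ [] then [s, [c]] else [[c]]), []) := by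
        unfold nwTokStep
        rw [if_pos hc]
        by_cases hs : s = [] <;> simp [hs]
      rw [htok, nwTokStep_acc cs (if s ≠ [] then [s, [c]] else [[c]]) []]
      have hfin : tokFin ((if s ≠ [] then [s, [c]] else [[c]]) ++ (List.foldl nwTokStep ([], []) cs).1,
            (List.foldl nwTokStep ([], []) cs).2)
          = (if s ≠ [] then [s, [c]] else [[c]]) ++ tokFin (List.foldl nwTokStep ([], []) cs) := by
        unfold tokFin
        by_cases h : (List.foldl nwTokStep ([], []) cs).2 = [] <;> simp [h]
      rw [hfin, List.foldl_append]
    · rw [if_neg hc]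
      have hns' : pvNoSpec (s ++ [c]) := by
        intro x hx
        rcases List.mem_append.mp hx with h | h
        · exact hns x h
        · rw [List.mem_singleton] at h
          subst h
          intro hmem
          exact hc (by simpa [pvSpecials] using hmem)
      rw [ih st (s ++ [c]) hns']
      have htok : nwTokStep ([], s) c = ([], s ++ [c]) := by
        unfold nwTokStep
        rw [if_neg hc]
      rw [htok]

-- ===== VERDICT (by name: the statement is the Claim_ definition above) =====
theorem from_newick_spec : Claim_equal_from_newick := by
  intro nws _ _
  show from_newick nws = from_newick_alt nws
  have h := main_inv nws.toList (PySem.Dict.empty, [], "", none) [] (by intro x hx; simp at hx)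
  exact congrArg (fun st : NwSt => st.1.items) h.symm
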